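-- pv_equiv track=rewrite | github.com/gilsharon/bootcamp | Ex2.4.py | find_first_stop
-- ===== SOURCE A (Python) =====
-- def find_first_stop(seq):
--     '''
--     input is a sequence starting after an ATG
--     returns the inframe stop conon ORF
--     '''
--     stop = ['TGA','TAG','TAA']
--     sequence = seq[:]
--     next_codon = sequence[:3]
--     sequence = sequence[3:]
--     ORF = ''
--     while next_codon not in stop and sequence != '':
--         ORF += next_codon
--         next_codon = sequence[:3]
--         sequence = sequence[3:]
--     if next_codon in stop:
--         return ORF + next_codon
--     else: return ''
-- ===== SOURCE B (Python) =====
-- def find_first_stop(seq):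
--     stops = ('TGA', 'TAG', 'TAA')
--     for i in range(0, len(seq) - 2, 3):
--         if seq[i:i+3] in stops:
--             return seq[:i+3]
--     return ''
-- ===== Notes on version B (the rewrite author's own statement) =====
-- stated objective: faster
-- what changed: A's while-loop that repeatedly reslices the remaining sequence and rebuilds the ORF string by repeated concatenation is replaced by a single scan over codon start indices (range(0, len-2, 3)) that returns one prefix slice seq[:i+3] at the first in-frame stop.
import Mathlib
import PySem

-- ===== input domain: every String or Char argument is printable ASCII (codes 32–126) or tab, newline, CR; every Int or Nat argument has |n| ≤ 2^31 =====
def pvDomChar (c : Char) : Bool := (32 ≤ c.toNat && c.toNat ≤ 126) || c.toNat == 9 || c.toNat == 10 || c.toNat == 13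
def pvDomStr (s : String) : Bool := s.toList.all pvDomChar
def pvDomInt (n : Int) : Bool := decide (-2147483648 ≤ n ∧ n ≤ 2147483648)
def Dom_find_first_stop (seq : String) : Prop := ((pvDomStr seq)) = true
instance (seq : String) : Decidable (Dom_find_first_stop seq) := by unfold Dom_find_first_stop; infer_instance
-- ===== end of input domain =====

-- B replaces A's accumulate-and-reslice while-loop (quadratic string rebuilding) with a
-- single index scan over codon start positions and one final prefix slice (objective: faster).

-- slice fact cited by pvALoop's decreasing_by (must precede the port)
lemma pvSliceDrop3 (xs : List Char) : PySem.List.slice xs (some 3) none = xs.drop 3 := by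
  rw [PySem.List.slice_from xs (by norm_num : (0:Int) ≤ 3)]; rfl

-- ===== PORT A =====
-- stop = ['TGA','TAG','TAA']  (the literal constant of both Pythons)
def pvStops : List (List Char) := ["TGA".toList, "TAG".toList, "TAA".toList]

-- A's while-loop; state = (next_codon, sequence, ORF); the trailing if/else of A
-- is the else-branch here (it runs exactly when the loop condition fails).
def pvALoop (next_codon sequence ORF : List Char) : List Char :=
  if _h : next_codon ∉ pvStops ∧ sequence ≠ [] then
    pvALoop (PySem.Chars.slice sequence none (some 3))
            (PySem.Chars.slice sequence (some 3) none)
            (ORF ++ next_codon)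
  else if next_codon ∈ pvStops then ORF ++ next_codon
  else []
termination_by sequence.length
decreasing_by
  simp only [PySem.Chars.slice_eq_listSlice, pvSliceDrop3, List.length_drop]
  have := List.length_pos_of_ne_nil _h.2
  omega

def find_first_stop (seq : String) : String :=
  -- sequence = seq[:] (a copy of the same string); next_codon = sequence[:3]; sequence = sequence[3:]
  String.ofList (pvALoop (PySem.Chars.slice seq.toList none (some 3))
                         (PySem.Chars.slice seq.toList (some 3) none)
                         [])

-- ===== PORT B =====
-- for i in range(0, len(seq) - 2, 3): if seq[i:i+3] in stops: return seq[:i+3]; return ''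
def pvBLoop (s : List Char) : List Int → List Char
  | [] => []
  | i :: rest =>
      if PySem.Chars.slice s (some i) (some (i + 3)) ∈ pvStops then
        PySem.Chars.slice s none (some (i + 3))
      else pvBLoop s rest

def find_first_stop_alt (seq : String) : String :=
  String.ofList (pvBLoop seq.toList
    (PySem.List.pyRange 0 (PySem.Chars.len seq.toList - 2) 3))

-- ===== PRECONDITION & SPEC =====
def Spec_find_first_stop (seq : String) (out : String) : Prop := out = find_first_stop_alt seq
instance (seq : String) (out : String) : Decidable (Spec_find_first_stop seq out) := by unfold Spec_find_first_stop; infer_instance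

-- ===== CLAIM (what is proved, stated in full; the proofs are below) =====
def Claim_equal_find_first_stop : Prop := ∀ (seq : String), Dom_find_first_stop seq → Spec_find_first_stop seq (find_first_stop seq)

-- ===== LEMMAS AND PROOFS =====

lemma pvSliceTake3 (xs : List Char) : PySem.List.slice xs none (some 3) = xs.take 3 := by
  rw [PySem.List.slice_to xs (by norm_num : (0:Int) ≤ 3)]; rfl

-- Reference shape both loops are reduced to: the prefix of s up to and including the
-- first frame-aligned stop codon, [] if there is none.
def pvGo (s : List Char) : List Char :=
  if s.take 3 ∈ pvStops then s.take 3
  else if _h : s.length ≤ 3 then []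
  else
    let r := pvGo (s.drop 3)
    if r = [] then [] else s.take 3 ++ r
termination_by s.length
decreasing_by simp only [List.length_drop]; omega

lemma pvStops_len {c : List Char} (h : c ∈ pvStops) : c.length = 3 := by
  simp only [pvStops, List.mem_cons, List.not_mem_nil, or_false] at h
  rcases h with h | h | h <;> simp [h]

lemma pvGo_short {s : List Char} (h : s.length ≤ 2) : pvGo s = [] := by
  rw [pvGo]
  have h1 : s.take 3 ∉ pvStops := by
    intro hm
    have := pvStops_len hm
    simp only [List.length_take] at this
    omega
  rw [if_neg h1, dif_pos (by omega)]

lemma pvGo_step {s : List Char} (h : s.take 3 ∉ pvStops) :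
    pvGo s = if pvGo (s.drop 3) = [] then [] else s.take 3 ++ pvGo (s.drop 3) := by
  rw [pvGo, if_neg h]
  by_cases h3 : s.length ≤ 3
  · have hd : s.drop 3 = [] := List.drop_eq_nil_of_le h3
    rw [dif_pos h3, hd]
    have hnil : pvGo ([] : List Char) = [] := pvGo_short (by simp)
    rw [hnil, if_pos rfl]
  · rw [dif_neg h3]

lemma pvGo_ne_nil_of_stop {s : List Char} (h : s.take 3 ∈ pvStops) :
    pvGo s = s.take 3 ∧ s.take 3 ≠ [] := by
  refine ⟨by rw [pvGo, if_pos h], ?_⟩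
  intro hnil
  have := pvStops_len h
  rw [hnil] at this
  simp at this

-- A's loop computes acc ++ pvGo s (and [] when there is no stop, discarding acc).
lemma pvALoop_eq (s acc : List Char) :
    pvALoop (s.take 3) (s.drop 3) acc = if pvGo s = [] then [] else acc ++ pvGo s := by
  induction s using pvGo.induct generalizing acc with
  | case1 s hstop =>
      obtain ⟨hgo, hne⟩ := pvGo_ne_nil_of_stop hstop
      rw [pvALoop.eq_def]
      have hcond : ¬ (s.take 3 ∉ pvStops ∧ s.drop 3 ≠ []) := by
        intro hc; exact hc.1 hstop
      rw [dif_neg hcond, if_pos hstop, hgo, if_neg hne]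
  | case2 s hstop hlen =>
      have hd : s.drop 3 = [] := List.drop_eq_nil_of_le hlen
      rw [pvALoop.eq_def]
      have hcond : ¬ (s.take 3 ∉ pvStops ∧ s.drop 3 ≠ []) := by
        intro hc; exact hc.2 hd
      rw [dif_neg hcond, if_neg hstop]
      rw [pvGo, if_neg hstop, dif_pos hlen, if_pos rfl]
  | case3 s hstop hlen r hr ih =>
      rw [pvALoop.eq_def]
      have hd : s.drop 3 ≠ [] := by
        intro hc
        have := List.drop_eq_nil_iff.mp hc
        omega
      rw [dif_pos ⟨hstop, hd⟩]
      simp only [PySem.Chars.slice_eq_listSlice, pvSliceTake3, pvSliceDrop3]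
      rw [ih, pvGo_step hstop]
      by_cases hnil : pvGo (s.drop 3) = []
      · simp [hnil]
      · simp [hnil, List.append_eq_nil_iff, List.append_assoc]
  | case4 s hstop hlen r hr ih =>
      rw [pvALoop.eq_def]
      have hd : s.drop 3 ≠ [] := by
        intro hc
        have := List.drop_eq_nil_iff.mp hc
        omega
      rw [dif_pos ⟨hstop, hd⟩]
      simp only [PySem.Chars.slice_eq_listSlice, pvSliceTake3, pvSliceDrop3]
      rw [ih, pvGo_step hstop]
      by_cases hnil : pvGo (s.drop 3) = []
      · simp [hnil]
      · simp [hnil, List.append_eq_nil_iff, List.append_assoc]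

lemma pyRange3_nil (a b : Int) (h : b ≤ a) : PySem.List.pyRange a b 3 = [] := by
  rw [PySem.List.pyRange_of_pos a b (by norm_num)]
  simp [show ¬ a < b by omega]

lemma pyRange3_cons (a b : Int) (h : a < b) :
    PySem.List.pyRange a b 3 = a :: PySem.List.pyRange (a + 3) b 3 := by
  rw [PySem.List.pyRange_of_pos a b (by norm_num),
      PySem.List.pyRange_of_pos (a + 3) b (by norm_num), if_pos h]
  have h1 : ((b - a + 3 - 1) / 3).toNat = ((b - (a + 3) + 3 - 1) / 3).toNat + 1 := by omega
  rw [h1, List.range_succ_eq_map]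
  by_cases h2 : a + 3 < b
  · rw [if_pos h2]
    simp only [List.map_cons, List.map_map, Nat.cast_zero, mul_zero, add_zero, List.cons.injEq,
      true_and]
    apply List.map_congr_left
    intro k _
    simp only [Function.comp_apply]
    push_cast
    ring
  · rw [if_neg h2]
    have h0 : ((b - (a + 3) + 3 - 1) / 3).toNat = 0 := by omega
    simp [h0]

-- B's scan from start index j computes s.take j ++ pvGo (s.drop j) (or [] if no stop).
lemma pvBLoop_eq (s : List Char) (n j : ℕ) (hn : s.length ≤ j + n) :
    pvBLoop s (PySem.List.pyRange (j : Int) ((s.length : Int) - 2) 3) =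
      if pvGo (s.drop j) = [] then [] else s.take j ++ pvGo (s.drop j) := by
  induction n generalizing j with
  | zero =>
      rw [pyRange3_nil _ _ (by omega), pvBLoop]
      have hshort : (s.drop j).length ≤ 2 := by simp only [List.length_drop]; omega
      rw [pvGo_short hshort, if_pos rfl]
  | succ m ih =>
      by_cases hj : (j : Int) < (s.length : Int) - 2
      · rw [pyRange3_cons _ _ hj, pvBLoop]
        have hsl : PySem.Chars.slice s (some (j : Int)) (some ((j : Int) + 3)) =
            (s.drop j).take 3 := by
          rw [PySem.Chars.slice_eq_listSlice,
            show ((j : Int) + 3) = ((j : Int) + ((3 : ℕ) : Int)) by norm_num,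
            PySem.List.slice_natCast_add]
        rw [hsl]
        by_cases hstop : (s.drop j).take 3 ∈ pvStops
        · rw [if_pos hstop]
          obtain ⟨hgo, hne⟩ := pvGo_ne_nil_of_stop hstop
          rw [hgo, if_neg hne]
          rw [PySem.Chars.slice_eq_listSlice,
            PySem.List.slice_to s (by omega : (0:Int) ≤ (j : Int) + 3),
            show ((j : Int) + 3).toNat = j + 3 by omega, List.take_add]
        · rw [if_neg hstop]
          rw [show ((j : Int) + 3) = (((j + 3 : ℕ)) : Int) by push_cast; ring,
            ih (j + 3) (by omega), pvGo_step hstop]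
          by_cases hr : pvGo (s.drop (j + 3)) = []
          · simp [hr]
          · simp [hr, List.append_eq_nil_iff, List.take_add, List.append_assoc]
      · rw [pyRange3_nil _ _ (by omega), pvBLoop]
        have hshort : (s.drop j).length ≤ 2 := by simp only [List.length_drop]; omega
        rw [pvGo_short hshort, if_pos rfl]

-- ===== VERDICT (by name: the statement is the Claim_ definition above) =====
theorem find_first_stop_spec : Claim_equal_find_first_stop := by
  intro seq _
  unfold Spec_find_first_stop find_first_stop find_first_stop_alt
  simp only [PySem.Chars.slice_eq_listSlice, pvSliceTake3, pvSliceDrop3]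
  rw [pvALoop_eq seq.toList []]
  rw [show PySem.Chars.len seq.toList = (seq.toList.length : Int) by
        simp [PySem.Chars.len_eq],
      show (0 : Int) = ((0 : ℕ) : Int) by norm_num,
      pvBLoop_eq seq.toList seq.toList.length 0 (by omega)]
  simp only [List.drop_zero, List.take_zero, List.nil_append]
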